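-- pv_equiv track=rewrite | github.com/Math1313/8IAR101-LyricsLabMuse | src/core/music_composition_export_formatter.py | _extract_melody_pattern
-- ===== SOURCE A (Python) =====
-- from typing import Dict, Any, List
--
-- def _extract_melody_pattern(text: str) -> List[str]:
--     """Extract melody pattern from text"""
--     pattern = []
--     in_pattern = False
--     for line in text.split('\n'):
--         if '*' in line and ':' not in line:  # Pattern typically starts after a bullet point
--             in_pattern = True
--             continue
--         if in_pattern and line.strip():
--             if '-' in line:
--                 notes = [n.strip() for n in line.split('-')]
--                 pattern.extend(notes)
--     return pattern
-- ===== SOURCE B (Python) =====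
-- from typing import List
--
-- def _extract_melody_pattern(text: str) -> List[str]:
--     """Stateless formulation: a line contributes its dash-split notes iff
--     some strictly earlier line is a bullet and the line itself is not."""
--     lines = text.split('\n')
--     return [n.strip()
--             for i, line in enumerate(lines)
--             if any('*' in p and ':' not in p for p in lines[:i])
--             and not ('*' in line and ':' not in line)
--             and line.strip() and '-' in line
--             for n in line.split('-')]
-- ===== Notes on version B (the rewrite author's own statement) =====
-- stated objective: alternative
-- what changed: Replaces A's stateful flag-carrying loop by a stateless comprehension: each line contributes its notes iff some strictly earlier line is a bullet line, checked with a per-line prefix scan (no mutable state).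
import Mathlib
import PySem

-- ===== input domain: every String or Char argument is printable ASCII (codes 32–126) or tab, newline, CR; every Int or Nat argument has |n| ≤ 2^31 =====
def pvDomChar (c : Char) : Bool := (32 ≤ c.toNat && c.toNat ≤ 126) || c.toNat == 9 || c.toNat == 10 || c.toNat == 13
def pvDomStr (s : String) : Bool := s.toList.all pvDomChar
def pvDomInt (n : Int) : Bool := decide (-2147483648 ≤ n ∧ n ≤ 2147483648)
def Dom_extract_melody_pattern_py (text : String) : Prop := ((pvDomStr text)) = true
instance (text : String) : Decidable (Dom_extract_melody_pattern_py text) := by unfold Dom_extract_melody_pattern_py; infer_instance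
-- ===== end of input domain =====

-- B replaces A's flag-carrying loop by a stateless formulation: a line contributes its
-- dash-split notes iff some strictly earlier line is a bullet line; same result, no mutable state.


-- ===== PORT A =====
-- "'*' in line and ':' not in line" (used verbatim by both Pythons)
def pvBullet (line : String) : Bool :=
  PySem.Str.isIn "*" line && !(PySem.Str.isIn ":" line)

-- one step of A's loop, state = (pattern, in_pattern)
def pvStepA (st : List String × Bool) (line : String) : List String × Bool :=
  if pvBullet line then (st.1, true)
  else if st.2 && (PySem.Str.strip line != "") then
    if PySem.Str.isIn "-" line then
      (st.1 ++ ((PySem.Str.split? line "-").getD []).map PySem.Str.strip, st.2)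
    else st
  else st

def extract_melody_pattern_py (text : String) : List String :=
  (((PySem.Str.split? text "\n").getD []).foldl pvStepA ([], false)).1

-- ===== PORT B =====
-- B's comprehension over enumerate(lines): recursion carrying the index i, the
-- per-line guard reads the prefix lines[:i] of the full list (Source B's `any(... for p in lines[:i])`)
def pvCompAux (all : List String) (i : Nat) : List String → List String
  | [] => []
  | l :: ls =>
      (if (all.take i).any pvBullet && !pvBullet l
          && (PySem.Str.strip l != "") && PySem.Str.isIn "-" l then
        ((PySem.Str.split? l "-").getD []).map PySem.Str.strip
      else []) ++ pvCompAux all (i + 1) ls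

def extract_melody_pattern_py_alt (text : String) : List String :=
  let lines := (PySem.Str.split? text "\n").getD []
  pvCompAux lines 0 lines

-- ===== PRECONDITION & SPEC =====
def Spec_extract_melody_pattern_py (text : String) (out : List String) : Prop := out = extract_melody_pattern_py_alt text
instance (text : String) (out : List String) : Decidable (Spec_extract_melody_pattern_py text out) := by unfold Spec_extract_melody_pattern_py; infer_instance

-- ===== CLAIM (what is proved, stated in full; the proofs are below) =====
def Claim_equal_extract_melody_pattern_py : Prop := ∀ (text : String), Dom_extract_melody_pattern_py text → Spec_extract_melody_pattern_py text (extract_melody_pattern_py text)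

-- ===== LEMMAS AND PROOFS =====

-- semantic contribution of one line once the pattern has started
def pvNotes (line : String) : List String :=
  if pvBullet line then []
  else if PySem.Str.strip line != "" && PySem.Str.isIn "-" line then
    ((PySem.Str.split? line "-").getD []).map PySem.Str.strip
  else []

-- once in_pattern is true, A's loop appends exactly the per-line contributions
theorem pvFoldA_true (lines : List String) (acc : List String) :
    (lines.foldl pvStepA (acc, true)).1 = acc ++ lines.flatMap pvNotes := by
  induction lines generalizing acc with
  | nil => simp
  | cons l ls ih =>
    simp only [List.foldl_cons, List.flatMap_cons, pvStepA, pvNotes]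
    by_cases hb : pvBullet l
    · simp [hb, ih]
    · by_cases hs : PySem.Str.strip l != ""
      · by_cases hd : PySem.Chars.isIn ['-'] l.toList
        · simp [hb, hs, hd, ih]
        · simp [hb, hs, hd, ih]
      · simp [hb, hs, ih]

-- before the first bullet line, A's loop discards every line; afterwards it appends pvNotes
theorem pvFoldA_false (lines : List String) :
    (lines.foldl pvStepA ([], false)).1 =
      match lines.findIdx? pvBullet with
      | none => []
      | some i => (lines.drop (i + 1)).flatMap pvNotes := by
  induction lines with
  | nil => simp
  | cons l ls ih =>
    simp only [List.foldl_cons, List.findIdx?_cons, pvStepA]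
    by_cases hb : pvBullet l
    · simp [hb, pvFoldA_true]
    · simp only [hb, if_false, Bool.false_eq_true, Bool.false_and]
      rw [ih]
      cases ls.findIdx? pvBullet <;> simp

-- a bullet in lines[:i] stays in lines[:i+1]
theorem pvTake_succ_any (all : List String) (i : Nat)
    (h : (all.take i).any pvBullet = true) : (all.take (i + 1)).any pvBullet = true := by
  rw [List.take_add_one, List.any_append, h]; rfl

-- once the prefix contains a bullet, B's recursion yields exactly the pvNotes flatten
theorem pvCompAux_true (rest : List String) (all : List String) (i : Nat)
    (h : (all.take i).any pvBullet = true) :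
    pvCompAux all i rest = rest.flatMap pvNotes := by
  induction rest generalizing i with
  | nil => simp [pvCompAux]
  | cons l ls ih =>
    simp only [pvCompAux, List.flatMap_cons, h, Bool.true_and,
      ih (i + 1) (pvTake_succ_any all i h), pvNotes]
    by_cases hb : pvBullet l
    · simp [hb]
    · by_cases hs : PySem.Str.strip l != ""
      · by_cases hd : PySem.Chars.isIn ['-'] l.toList
        · simp [hb, hs, hd]
        · simp [hb, hs, hd]
      · simp [hb, hs]

-- before any bullet, B's recursion matches the find-first-bullet characterisation
theorem pvCompAux_false (rest : List String) (all : List String) (i : Nat)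
    (hd : all.drop i = rest) (h : (all.take i).any pvBullet = false) :
    pvCompAux all i rest =
      match rest.findIdx? pvBullet with
      | none => []
      | some j => (rest.drop (j + 1)).flatMap pvNotes := by
  induction rest generalizing i with
  | nil => simp [pvCompAux]
  | cons l ls ih =>
    have hget : all[i]? = some l := by
      have h0 : (List.drop i all)[0]? = all[i + 0]? := List.getElem?_drop
      rw [hd] at h0
      simpa using h0.symm
    have htake : all.take (i + 1) = all.take i ++ [l] := by
      rw [List.take_add_one, hget]; rfl
    have hdrop : all.drop (i + 1) = ls := by
      have : all.drop (i + 1) = (all.drop i).drop 1 := by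
        rw [List.drop_drop]
      simp [this, hd]
    simp only [pvCompAux, List.findIdx?_cons, h, Bool.false_and]
    by_cases hb : pvBullet l
    · have : (all.take (i + 1)).any pvBullet = true := by
        simp [htake, hb]
      simp [hb, pvCompAux_true ls all (i + 1) this]
    · have hfa : (all.take (i + 1)).any pvBullet = false := by
        simp [htake, hb, h]
      rw [ih (i + 1) hdrop hfa]
      cases ls.findIdx? pvBullet <;> simp [hb]

-- ===== VERDICT (by name: the statement is the Claim_ definition above) =====
theorem extract_melody_pattern_py_spec : Claim_equal_extract_melody_pattern_py := by
  intro text _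
  unfold Spec_extract_melody_pattern_py extract_melody_pattern_py extract_melody_pattern_py_alt
  rw [pvFoldA_false]
  exact (pvCompAux_false ((PySem.Str.split? text "\n").getD []) ((PySem.Str.split? text "\n").getD []) 0 rfl rfl).symm
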